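-- pv_equiv track=rewrite | github.com/jeju2486/GeneScanner | mutation_analysis.py | compute_effective_alignment_lengths
-- ===== SOURCE A (Python) =====
-- def compute_effective_alignment_lengths(aligned_protein_seqs, original_effective_lengths):
--     effective_aln_lengths = {}
--     for sid, seq in aligned_protein_seqs.items():
--         count = 0
--         orig_len = original_effective_lengths[sid]
--         for i, char in enumerate(seq):
--             if char != '-':
--                 count += 1
--             if count == orig_len:
--                 effective_aln_lengths[sid] = i + 1  # using 1-based indexing in alignment
--                 break
--         if sid not in effective_aln_lengths:
--             effective_aln_lengths[sid] = len(seq)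
--     return effective_aln_lengths
-- ===== SOURCE B (Python) =====
-- def compute_effective_alignment_lengths(aligned_protein_seqs, original_effective_lengths):
--     # Two-pass per sequence: build the full prefix table of cumulative non-gap
--     # counts, then search it for the first entry equal to the original length.
--     result = {}
--     for sid, seq in aligned_protein_seqs.items():
--         counts = []
--         c = 0
--         for ch in seq:
--             if ch != '-':
--                 c += 1
--             counts.append(c)
--         orig = original_effective_lengths[sid]
--         try:
--             result[sid] = counts.index(orig) + 1
--         except ValueError:
--             result[sid] = len(seq)
--     return result
-- ===== Notes on version B (the rewrite author's own statement) =====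
-- stated objective: alternative
-- what changed: Per sequence, the interleaved count-and-break scan is replaced by a two-pass shape: first build the complete prefix table of cumulative non-gap counts, then locate the answer with a single list.index search for the first entry equal to the original effective length.
import Mathlib
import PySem

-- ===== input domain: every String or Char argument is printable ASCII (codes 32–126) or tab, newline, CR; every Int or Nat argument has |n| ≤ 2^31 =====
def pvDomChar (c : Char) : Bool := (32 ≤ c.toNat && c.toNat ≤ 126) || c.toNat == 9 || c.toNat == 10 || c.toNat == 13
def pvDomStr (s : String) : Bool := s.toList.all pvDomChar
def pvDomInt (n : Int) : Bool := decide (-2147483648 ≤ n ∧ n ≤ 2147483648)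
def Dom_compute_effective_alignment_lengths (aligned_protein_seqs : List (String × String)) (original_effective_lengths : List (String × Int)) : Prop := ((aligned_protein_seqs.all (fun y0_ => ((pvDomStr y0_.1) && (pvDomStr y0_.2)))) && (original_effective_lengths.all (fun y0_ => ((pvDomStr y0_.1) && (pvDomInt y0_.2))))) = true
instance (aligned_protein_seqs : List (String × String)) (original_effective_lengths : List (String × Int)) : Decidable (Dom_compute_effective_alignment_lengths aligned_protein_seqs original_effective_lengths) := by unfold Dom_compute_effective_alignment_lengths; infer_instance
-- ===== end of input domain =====

-- B replaces A's interleaved scan-with-break by a two-pass prefix-count table plus a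
-- single first-index search (objective: alternative decomposition, same cost).

-- ===== PORT A =====
-- inner 'for i, char in enumerate(seq): …' with its break, threading the result dict
def pvAScan (sid : String) (orig_len : Int) : List Char → Nat → Int → PySem.Dict String Int → PySem.Dict String Int
  | [], _, _, d => d
  | ch :: rest, i, count, d =>
    let count' := if ch ≠ '-' then count + 1 else count
    if count' = orig_len then d.insert sid ((i : Int) + 1)
    else pvAScan sid orig_len rest (i + 1) count' d

def compute_effective_alignment_lengths (aligned_protein_seqs : List (String × String)) (original_effective_lengths : List (String × Int)) : List (String × Int) :=
  (aligned_protein_seqs.foldl (fun d p =>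
      let seq := p.2.toList
      -- original_effective_lengths[sid]: KeyError (= none) is excluded by Pre_; getD 0 is never reached there
      let orig_len := ((PySem.Dict.mk original_effective_lengths).get? p.1).getD 0
      let d' := pvAScan p.1 orig_len seq 0 0 d
      if d'.contains p.1 then d' else d'.insert p.1 (seq.length : Int))
    PySem.Dict.empty).items

-- ===== PORT B =====
-- prefix table of cumulative non-gap counts
def pvPrefixCounts : List Char → Int → List Int
  | [], _ => []
  | ch :: rest, c =>
    let c' := if ch ≠ '-' then c + 1 else c
    c' :: pvPrefixCounts rest c'

def compute_effective_alignment_lengths_alt (aligned_protein_seqs : List (String × String)) (original_effective_lengths : List (String × Int)) : List (String × Int) :=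
  (aligned_protein_seqs.foldl (fun d p =>
      let counts := pvPrefixCounts p.2.toList 0
      let orig := ((PySem.Dict.mk original_effective_lengths).get? p.1).getD 0
      let v : Int := match PySem.List.index? counts orig with
        | some i => (i : Int) + 1
        | none => (p.2.toList.length : Int)
      d.insert p.1 v)
    PySem.Dict.empty).items

-- ===== PRECONDITION & SPEC =====
-- Pre_ excludes (a) inputs whose aligned dict, as an association list, carries duplicate
-- keys — such lists denote no Python dict, so the list-level behaviour is accidental —
-- and (b) sequence ids missing from original_effective_lengths, where A raises KeyError.
def Pre_compute_effective_alignment_lengths (aligned_protein_seqs : List (String × String)) (original_effective_lengths : List (String × Int)) : Prop :=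
  (aligned_protein_seqs.map Prod.fst).Nodup ∧
  ∀ p ∈ aligned_protein_seqs, p.1 ∈ original_effective_lengths.map Prod.fst

instance (aligned_protein_seqs : List (String × String)) (original_effective_lengths : List (String × Int)) : Decidable (Pre_compute_effective_alignment_lengths aligned_protein_seqs original_effective_lengths) := by unfold Pre_compute_effective_alignment_lengths; infer_instance

def pvWitness_compute_effective_alignment_lengths : (List (String × String)) × (List (String × Int)) :=
  ([("s1", "a-b"), ("s2", "--")], [("s1", (2 : Int)), ("s2", (0 : Int))])

def Spec_compute_effective_alignment_lengths (aligned_protein_seqs : List (String × String)) (original_effective_lengths : List (String × Int)) (out : List (String × Int)) : Prop := out = compute_effective_alignment_lengths_alt aligned_protein_seqs original_effective_lengths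
instance (aligned_protein_seqs : List (String × String)) (original_effective_lengths : List (String × Int)) (out : List (String × Int)) : Decidable (Spec_compute_effective_alignment_lengths aligned_protein_seqs original_effective_lengths out) := by unfold Spec_compute_effective_alignment_lengths; infer_instance

-- ===== CLAIM (what is proved, stated in full; the proofs are below) =====
def Claim_equal_compute_effective_alignment_lengths : Prop := ∀ (aligned_protein_seqs : List (String × String)) (original_effective_lengths : List (String × Int)), Dom_compute_effective_alignment_lengths aligned_protein_seqs original_effective_lengths → Pre_compute_effective_alignment_lengths aligned_protein_seqs original_effective_lengths → Spec_compute_effective_alignment_lengths aligned_protein_seqs original_effective_lengths (compute_effective_alignment_lengths aligned_protein_seqs original_effective_lengths)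

-- ===== LEMMAS AND PROOFS =====

-- A's scan with break equals "first index of orig in the prefix-count table"
lemma pvAScan_eq_index (sid : String) (orig : Int) (seq : List Char) :
    ∀ (i : Nat) (c : Int) (d : PySem.Dict String Int),
      pvAScan sid orig seq i c d =
        match PySem.List.index? (pvPrefixCounts seq c) orig with
        | some j => d.insert sid (((i + j : Nat) : Int) + 1)
        | none => d := by
  induction seq with
  | nil => intro i c d; simp [pvAScan, pvPrefixCounts, PySem.List.index?]
  | cons ch rest ih =>
    intro i c d
    simp only [pvAScan, pvPrefixCounts]
    by_cases h : (if ch ≠ '-' then c + 1 else c) = orig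
    · rw [h, PySem.List.index?_cons_self]
      simp
    · rw [if_neg h, PySem.List.index?_cons_of_ne _ h]
      rw [ih (i + 1)]
      cases hidx : PySem.List.index? (pvPrefixCounts rest (if ch ≠ '-' then c + 1 else c)) orig with
      | none => simp
      | some j =>
        simp only [Option.map_some]
        congr 2
        omega

-- one step of A's fold equals one step of B's fold, provided sid is not yet a key
lemma step_eq (oel : List (String × Int)) (d : PySem.Dict String Int) (p : String × String)
    (hd : d.get? p.1 = none) :
    (let seq := p.2.toList
     let orig_len := ((PySem.Dict.mk oel).get? p.1).getD 0
     let d' := pvAScan p.1 orig_len seq 0 0 d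
     if d'.contains p.1 then d' else d'.insert p.1 (seq.length : Int)) =
    (let counts := pvPrefixCounts p.2.toList 0
     let orig := ((PySem.Dict.mk oel).get? p.1).getD 0
     let v : Int := match PySem.List.index? counts orig with
       | some i => (i : Int) + 1
       | none => (p.2.toList.length : Int)
     d.insert p.1 v) := by
  simp only
  rw [pvAScan_eq_index]
  cases hidx : PySem.List.index? (pvPrefixCounts p.2.toList 0) (((PySem.Dict.mk oel).get? p.1).getD 0) with
  | some j =>
    rw [if_pos (PySem.Dict.contains_insert_self _ _ _)]
    norm_num
  | none =>
    rw [if_neg]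
    rw [PySem.Dict.contains_eq_isSome_get?, hd]
    simp

-- the two folds agree from any dict none of the pending keys is in
lemma fold_eq (oel : List (String × Int)) :
    ∀ (aps : List (String × String)) (d : PySem.Dict String Int),
      (aps.map Prod.fst).Nodup →
      (∀ p ∈ aps, d.get? p.1 = none) →
      (aps.foldl (fun d p =>
          let seq := p.2.toList
          let orig_len := ((PySem.Dict.mk oel).get? p.1).getD 0
          let d' := pvAScan p.1 orig_len seq 0 0 d
          if d'.contains p.1 then d' else d'.insert p.1 (seq.length : Int)) d) =
      (aps.foldl (fun d p =>
          let counts := pvPrefixCounts p.2.toList 0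
          let orig := ((PySem.Dict.mk oel).get? p.1).getD 0
          let v : Int := match PySem.List.index? counts orig with
            | some i => (i : Int) + 1
            | none => (p.2.toList.length : Int)
          d.insert p.1 v) d) := by
  intro aps
  induction aps with
  | nil => intro d _ _; rfl
  | cons p rest ih =>
    intro d hnd hfree
    simp only [List.foldl_cons]
    rw [step_eq oel d p (hfree p (List.mem_cons_self))]
    simp only [List.map_cons, List.nodup_cons] at hnd
    apply ih _ hnd.2
    intro q hq
    rw [PySem.Dict.get?_insert_of_ne]
    · exact hfree q (List.mem_cons_of_mem _ hq)
    · intro hq1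
      exact hnd.1 (hq1 ▸ List.mem_map_of_mem hq)

-- ===== VERDICT (by name: the statement is the Claim_ definition above) =====
theorem compute_effective_alignment_lengths_spec : Claim_equal_compute_effective_alignment_lengths := by
  intro aps oel _hdom hpre
  unfold Spec_compute_effective_alignment_lengths
  unfold compute_effective_alignment_lengths compute_effective_alignment_lengths_alt
  congr 1
  exact fold_eq oel aps PySem.Dict.empty hpre.1
    (fun p _ => PySem.Dict.get?_empty p.1)
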